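-- pv_equiv track=rewrite | github.com/koblosistvan/fakt2023 | Aranyosi Milán/Komal/november/Komal_I603.py | szimpatia
-- ===== SOURCE A (Python) =====
-- def szimpatia(elso_szam, masodik_szam):
--     szimp = 0
--     for i in range(len(elso_szam)):
--         for j in range(len(masodik_szam)):
--             if masodik_szam[j] == 0:
--                 continue
--             if elso_szam[i] % masodik_szam[j] == 0:
--                 szimp += 1
--
--     for i in range(len(masodik_szam)):
--         for j in range(len(elso_szam)):
--             if elso_szam[j] == 0:
--                 continue
--             if masodik_szam[i] % elso_szam[j] == 0:
--                 szimp += 1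
--     return szimp
-- ===== SOURCE B (Python) =====
-- def szimpatia(elso_szam, masodik_szam):
--     ca = {}
--     for x in elso_szam:
--         ca[x] = ca.get(x, 0) + 1
--     cb = {}
--     for y in masodik_szam:
--         cb[y] = cb.get(y, 0) + 1
--     total = 0
--     for x, nx in ca.items():
--         for y, ny in cb.items():
--             if y != 0 and x % y == 0:
--                 total += nx * ny
--             if x != 0 and y % x == 0:
--                 total += nx * ny
--     return total
-- ===== Notes on version B (the rewrite author's own statement) =====
-- stated objective: faster
-- what changed: B builds frequency counters of both lists once and sums nx*ny over pairs of DISTINCT values instead of testing every element pair, replacing A's two O(n*m) nested element loops with an O(n+m+da*db) loop over distinct values.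
import Mathlib
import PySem

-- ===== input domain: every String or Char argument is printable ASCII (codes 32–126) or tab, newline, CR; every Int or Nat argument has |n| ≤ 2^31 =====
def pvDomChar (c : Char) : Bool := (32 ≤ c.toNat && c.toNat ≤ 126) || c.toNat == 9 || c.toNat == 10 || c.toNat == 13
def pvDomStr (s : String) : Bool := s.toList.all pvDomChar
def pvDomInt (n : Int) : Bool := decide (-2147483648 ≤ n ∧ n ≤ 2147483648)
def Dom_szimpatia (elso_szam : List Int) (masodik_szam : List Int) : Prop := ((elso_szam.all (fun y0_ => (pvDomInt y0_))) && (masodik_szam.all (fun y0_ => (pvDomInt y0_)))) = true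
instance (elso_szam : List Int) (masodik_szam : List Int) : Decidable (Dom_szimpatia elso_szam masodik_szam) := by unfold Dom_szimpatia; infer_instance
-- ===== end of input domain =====

-- B replaces A's O(n·m) nested element loops by frequency counters and a double loop
-- over DISTINCT values, weighting each divisibility test by the product of the counts.

-- ===== PORT A =====
def szimpatia (elso_szam : List Int) (masodik_szam : List Int) : Int :=
  let szimp : Int :=
    (PySem.List.pyRange 0 (elso_szam.length : Int) 1).foldl (fun s i =>
      (PySem.List.pyRange 0 (masodik_szam.length : Int) 1).foldl (fun s j =>
        if PySem.List.pyGetD masodik_szam j 0 = 0 then s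
        else if PySem.Int.mod (PySem.List.pyGetD elso_szam i 0) (PySem.List.pyGetD masodik_szam j 0) = 0 then s + 1
        else s) s) 0
  (PySem.List.pyRange 0 (masodik_szam.length : Int) 1).foldl (fun s i =>
    (PySem.List.pyRange 0 (elso_szam.length : Int) 1).foldl (fun s j =>
      if PySem.List.pyGetD elso_szam j 0 = 0 then s
      else if PySem.Int.mod (PySem.List.pyGetD masodik_szam i 0) (PySem.List.pyGetD elso_szam j 0) = 0 then s + 1
      else s) s) szimp

-- ===== PORT B =====
def szimpatia_alt (elso_szam : List Int) (masodik_szam : List Int) : Int :=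
  let ca := elso_szam.foldl (fun d x => d.insert x (d.getD x 0 + 1)) (PySem.Dict.empty : PySem.Dict Int Int)
  let cb := masodik_szam.foldl (fun d y => d.insert y (d.getD y 0 + 1)) (PySem.Dict.empty : PySem.Dict Int Int)
  ca.items.foldl (fun t p =>
    cb.items.foldl (fun t q =>
      let t1 := if q.1 ≠ 0 ∧ PySem.Int.mod p.1 q.1 = 0 then t + p.2 * q.2 else t
      if p.1 ≠ 0 ∧ PySem.Int.mod q.1 p.1 = 0 then t1 + p.2 * q.2 else t1) t) 0

-- ===== PRECONDITION & SPEC =====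
def Spec_szimpatia (elso_szam : List Int) (masodik_szam : List Int) (out : Int) : Prop := out = szimpatia_alt elso_szam masodik_szam
instance (elso_szam : List Int) (masodik_szam : List Int) (out : Int) : Decidable (Spec_szimpatia elso_szam masodik_szam out) := by unfold Spec_szimpatia; infer_instance

-- ===== CLAIM (what is proved, stated in full; the proofs are below) =====
def Claim_equal_szimpatia : Prop := ∀ (elso_szam : List Int) (masodik_szam : List Int), Dom_szimpatia elso_szam masodik_szam → Spec_szimpatia elso_szam masodik_szam (szimpatia elso_szam masodik_szam)

-- ===== LEMMAS AND PROOFS =====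

-- per-pair contribution: pvG1 x y = 1 iff y ≠ 0 and y divides x; pvG is both directions
def pvG1 (x y : Int) : Int := if y ≠ 0 ∧ PySem.Int.mod x y = 0 then 1 else 0
def pvG (x y : Int) : Int := pvG1 x y + pvG1 y x

-- a foldl that adds f x at each step is init + Σ f
theorem pv_foldl_plus {α : Type} (f : α → Int) (xs : List α) (init : Int) :
    xs.foldl (fun s x => s + f x) init = init + (xs.map f).sum := by
  induction xs generalizing init with
  | nil => simp
  | cons x xs ih => simp [List.foldl_cons, ih]; ring

-- A's inner-loop body adds pvG1
theorem pv_body1 (x y s : Int) :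
    (if y = 0 then s else if PySem.Int.mod x y = 0 then s + 1 else s) = s + pvG1 x y := by
  unfold pvG1; split_ifs <;> simp_all

-- B's inner-loop body adds ny · (nx · pvG x y)
theorem pv_body_alt (x y nx ny t : Int) :
    (if x ≠ 0 ∧ PySem.Int.mod y x = 0
      then (if y ≠ 0 ∧ PySem.Int.mod x y = 0 then t + nx * ny else t) + nx * ny
      else (if y ≠ 0 ∧ PySem.Int.mod x y = 0 then t + nx * ny else t))
    = t + ny * (nx * pvG x y) := by
  unfold pvG pvG1; split_ifs <;> ring

-- Σ over a Nodup list of a function supported at one member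
theorem pv_sum_single (d : List Int) (hnd : d.Nodup) (x : Int) (hx : x ∈ d) (h : Int → Int) :
    (d.map (fun k => if k = x then h k else 0)).sum = h x := by
  induction d with
  | nil => cases hx
  | cons c d ih =>
    by_cases hc : c = x
    · subst hc
      have hz : ∀ k ∈ d, (if k = c then h k else 0) = 0 := by
        intro k hk
        have hne : k ≠ c := fun e => (List.nodup_cons.mp hnd).1 (e ▸ hk)
        simp [hne]
      have hz0 : (d.map (fun k => if k = c then h k else 0)).sum = 0 := by
        apply List.sum_eq_zero; intro y hy
        rcases List.mem_map.mp hy with ⟨k, hk, rfl⟩; exact hz k hk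
      simp [List.map_cons, List.sum_cons, hz0]
    · have hxd : x ∈ d := by
        rcases List.mem_cons.mp hx with e | hmem
        · exact absurd e.symm hc
        · exact hmem
      simp [List.map_cons, hc, ih (List.nodup_cons.mp hnd).2 hxd]

-- counting identity: over any Nodup list covering xs, Σ count·h = Σ_{x∈xs} h x
theorem pv_counter_sum (xs : List Int) (d : List Int) (hnd : d.Nodup)
    (hcov : ∀ x ∈ xs, x ∈ d) (h : Int → Int) :
    (d.map (fun k => (xs.count k : Int) * h k)).sum = (xs.map h).sum := by
  induction xs with
  | nil => simp
  | cons x xs ih =>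
    have hx : x ∈ d := hcov x (by simp)
    have step : ∀ k, ((x :: xs).count k : Int) * h k
        = (xs.count k : Int) * h k + (if k = x then h k else 0) := by
      intro k
      rw [List.count_cons]
      by_cases hk : x = k
      · subst hk; simp; ring
      · have hkx : k ≠ x := fun e => hk e.symm
        simp [hk, hkx]
    calc (d.map (fun k => ((x :: xs).count k : Int) * h k)).sum
        = (d.map (fun k => (xs.count k : Int) * h k + (if k = x then h k else 0))).sum := by
          simp only [step]
      _ = (d.map (fun k => (xs.count k : Int) * h k)).sum
            + (d.map (fun k => if k = x then h k else 0)).sum :=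
          PySem.List.sum_map_add_int d _ _
      _ = (xs.map h).sum + h x := by
          rw [ih (fun a ha => hcov a (by simp [ha])), pv_sum_single d hnd x hx h]
      _ = ((x :: xs).map h).sum := by simp [List.map_cons]; ring

-- swap the two summations
theorem pv_sum_swap (a b : List Int) (g : Int → Int → Int) :
    (b.map (fun y => (a.map (fun x => g x y)).sum)).sum
      = (a.map (fun x => (b.map (fun y => g x y)).sum)).sum := by
  induction a with
  | nil => simp
  | cons x a ih =>
    simp only [List.map_cons, List.sum_cons]
    rw [PySem.List.sum_map_add_int b (fun y => g x y) (fun y => (a.map (fun x => g x y)).sum), ih]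

-- A's index-loop pair as a double sum
theorem pv_double_loop (a b : List Int) (g : Int → Int → Int) (init : Int) :
    (PySem.List.pyRange 0 (a.length : Int) 1).foldl (fun s i =>
      (PySem.List.pyRange 0 (b.length : Int) 1).foldl (fun s j =>
        s + g (PySem.List.pyGetD a i 0) (PySem.List.pyGetD b j 0)) s) init
    = init + (a.map (fun x => (b.map (fun y => g x y)).sum)).sum := by
  rw [PySem.List.foldl_pyRange_zero_pyGetD' a 0
      (fun s x => (PySem.List.pyRange 0 (b.length : Int) 1).foldl
        (fun s j => s + g x (PySem.List.pyGetD b j 0)) s) init]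
  have hf : (fun (s : Int) (x : Int) => (PySem.List.pyRange 0 (b.length : Int) 1).foldl
      (fun s j => s + g x (PySem.List.pyGetD b j 0)) s)
      = fun s x => s + (b.map (fun y => g x y)).sum := by
    funext s x
    rw [PySem.List.foldl_pyRange_zero_pyGetD' b 0 (fun s y => s + g x y) s,
      pv_foldl_plus (fun y => g x y) b s]
  rw [hf]
  exact pv_foldl_plus _ a init

-- a fold over a counter's items that adds count·g(value) is Σ over the list of g
theorem pv_items_fold (xs : List Int) (g : Int → Int) (t : Int) :
    (PySem.Dict.counter xs).items.foldl (fun t q => t + q.2 * g q.1) t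
      = t + (xs.map g).sum := by
  rw [pv_foldl_plus (fun q => q.2 * g q.1) (PySem.Dict.counter xs).items t,
    PySem.Dict.items_counter, List.map_map]
  have hc : ((fun q : Int × Int => q.2 * g q.1) ∘ fun k => (k, ((xs.count k : Int))))
      = fun k => (xs.count k : Int) * g k := by funext k; simp
  rw [hc, pv_counter_sum xs (PySem.Set.ofList xs) (PySem.Set.nodup_ofList xs)
    (fun x hx => (PySem.Set.mem_ofList xs x).mpr hx) g]

-- both ports equal Σ_{x∈elso} Σ_{y∈masodik} pvG x y
theorem pv_A_eq (a b : List Int) :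
    szimpatia a b = (a.map (fun x => (b.map (fun y => pvG x y)).sum)).sum := by
  simp only [szimpatia]
  simp only [pv_body1]
  rw [pv_double_loop a b pvG1 0,
    pv_double_loop b a pvG1 (0 + (a.map (fun x => (b.map (fun y => pvG1 x y)).sum)).sum),
    pv_sum_swap a b (fun x y => pvG1 y x)]
  rw [show (fun x => (b.map (fun y => pvG x y)).sum)
        = fun x => (b.map (fun y => pvG1 x y)).sum + (b.map (fun y => pvG1 y x)).sum from
      funext fun x => by rw [← PySem.List.sum_map_add_int]; rfl,
    PySem.List.sum_map_add_int]
  ring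

theorem pv_B_eq (a b : List Int) :
    szimpatia_alt a b = (a.map (fun x => (b.map (fun y => pvG x y)).sum)).sum := by
  simp only [szimpatia_alt, PySem.Dict.foldl_insert_getD_add_one_eq_counter]
  simp only [pv_body_alt]
  have hf : (fun (t : Int) (p : Int × Int) =>
      (PySem.Dict.counter b).items.foldl
        (fun t q => t + q.2 * (p.2 * pvG p.1 q.1)) t)
      = fun t p => t + p.2 * (b.map (fun y => pvG p.1 y)).sum := by
    funext t p
    rw [pv_items_fold b (fun y => p.2 * pvG p.1 y) t, List.sum_map_mul_left]
  rw [hf, pv_items_fold a (fun x => (b.map (fun y => pvG x y)).sum) 0]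
  simp

-- ===== VERDICT (by name: the statement is the Claim_ definition above) =====
theorem szimpatia_spec : Claim_equal_szimpatia := by
  intro a b _
  unfold Spec_szimpatia
  rw [pv_A_eq, pv_B_eq]
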